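-- pv_equiv track=rewrite | github.com/MaxiLargo/Python | Soluciones/Guia7/Ejercicio3.py | columnas_ordenadas
-- ===== SOURCE A (Python) =====
-- def minimo (s:list):
--     i:int = s[0]
--
--     for j in range (0,len(s)):
--         if s[j]<i:
--             i = s[j]
--     return i
--
-- def ordenar(s:list)->list:
--     res:list = []
--     listaaux:list = s.copy()
--     for i in range (0,len(listaaux)):
--         res.append(minimo(listaaux))
--         listaaux.remove(minimo(listaaux))
--     return res
--
-- def columna(m:list[list[int]],e:int)->list[int]:
--     res:list=[]
--
--     for i in range(0,len(m)):
--         for j in range(0,len(m[i])):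
--             if j == e:
--                 res.append(m[i][j])
--     return res
--
-- def columnas_ordenadas(m:list[list[int]])->list[bool]:
--     columnaord:bool=False
--     res:list=[]
--     n:int = 0
--     for i in range(0,len(m)):
--         columnaord = False
--         n = 0
--         for j in range(0,len(columna(m,i))):
--             if columna(m,i) == ordenar(columna(m,i)) and n == 0:
--                 columnaord=True
--                 res.append(columnaord)
--                 n = 1
--     return res
-- ===== SOURCE B (Python) =====
-- def columnas_ordenadas(m: list[list[int]]) -> list[bool]:
--     # A appends True (and never False) for each index i in range(len(m)) whose
--     # column is non-empty and already sorted; B builds each column once and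
--     # checks adjacent pairs in one pass.
--     res = []
--     for i in range(len(m)):
--         col = [row[i] for row in m if i < len(row)]
--         if col and all(a <= b for a, b in zip(col, col[1:])):
--             res.append(True)
--     return res
-- ===== Notes on version B (the rewrite author's own statement) =====
-- stated objective: faster
-- what changed: B builds each column once and checks adjacent-pair sortedness in a single pass, instead of A's recomputing the column and selection-sorting it inside an inner loop over the column's length.
import Mathlib
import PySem

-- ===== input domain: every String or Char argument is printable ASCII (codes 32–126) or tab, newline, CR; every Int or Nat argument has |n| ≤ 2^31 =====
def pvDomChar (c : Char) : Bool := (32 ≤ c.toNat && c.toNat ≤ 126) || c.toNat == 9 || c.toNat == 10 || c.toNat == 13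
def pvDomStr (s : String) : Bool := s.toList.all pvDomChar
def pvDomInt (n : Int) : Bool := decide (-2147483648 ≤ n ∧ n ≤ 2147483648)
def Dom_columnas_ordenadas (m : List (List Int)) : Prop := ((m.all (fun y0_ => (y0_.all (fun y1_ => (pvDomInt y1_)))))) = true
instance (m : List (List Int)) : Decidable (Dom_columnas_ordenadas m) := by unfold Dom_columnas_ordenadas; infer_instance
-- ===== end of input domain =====

-- B builds each column once and checks adjacent-pair sortedness in one pass,
-- instead of A's recomputing and selection-sorting the column inside an inner loop (objective: faster).

-- ===== PORT A =====
-- minimo(s): s[0] then scan by index; only ever called on non-empty lists, so the getD default is never read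
def minimo (s : List Int) : Int :=
  (PySem.List.pyRange 0 (PySem.List.len s) 1).foldl
    (fun i j => if PySem.List.pyGetD s j 0 < i then PySem.List.pyGetD s j 0 else i)
    (PySem.List.pyGetD s 0 0)

-- ordenar(s): selection sort via repeated minimo + remove; the minimum is always present, so getD is never read
def ordenar (s : List Int) : List Int :=
  ((PySem.List.pyRange 0 (PySem.List.len s) 1).foldl
    (fun (st : List Int × List Int) _ =>
      (st.1 ++ [minimo st.2], (PySem.List.remove? st.2 (minimo st.2)).getD st.2))
    ([], s)).1

-- columna(m,e): double index loop appending m[i][j] whenever j == e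
def columna (m : List (List Int)) (e : Int) : List Int :=
  (PySem.List.pyRange 0 (PySem.List.len m) 1).foldl
    (fun res i =>
      let row := PySem.List.pyGetD m i []
      (PySem.List.pyRange 0 (PySem.List.len row) 1).foldl
        (fun res j => if j = e then res ++ [PySem.List.pyGetD row j 0] else res) res)
    []

-- state (columnaord, res, n), exactly A's loop nest
def columnas_ordenadas (m : List (List Int)) : List Bool :=
  ((PySem.List.pyRange 0 (PySem.List.len m) 1).foldl
    (fun (st : Bool × List Bool × Int) i =>
      (PySem.List.pyRange 0 (PySem.List.len (columna m i)) 1).foldl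
        (fun (st2 : Bool × List Bool × Int) _ =>
          if columna m i = ordenar (columna m i) ∧ st2.2.2 = 0 then
            (true, st2.2.1 ++ [true], 1)
          else st2)
        (false, st.2.1, 0))
    (false, [], 0)).2.1

-- ===== PORT B =====
def columnas_ordenadas_alt (m : List (List Int)) : List Bool :=
  (List.range m.length).foldl
    (fun res i =>
      let col := m.filterMap (fun row => row[i]?)   -- [row[i] for row in m if i < len(row)]
      if col ≠ [] ∧ (col.zip col.tail).all (fun p => decide (p.1 ≤ p.2)) then res ++ [true]
      else res)
    []

-- ===== PRECONDITION & SPEC =====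
def Spec_columnas_ordenadas (m : List (List Int)) (out : List Bool) : Prop := out = columnas_ordenadas_alt m
instance (m : List (List Int)) (out : List Bool) : Decidable (Spec_columnas_ordenadas m out) := by unfold Spec_columnas_ordenadas; infer_instance

-- ===== CLAIM (what is proved, stated in full; the proofs are below) =====
def Claim_equal_columnas_ordenadas : Prop := ∀ (m : List (List Int)), Dom_columnas_ordenadas m → Spec_columnas_ordenadas m (columnas_ordenadas m)

-- ===== LEMMAS AND PROOFS =====

-- B's adjacent-pair check, named for the proofs
def allAdj (c : List Int) : Bool := (c.zip c.tail).all (fun p => decide (p.1 ≤ p.2))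

theorem allAdj_nil : allAdj [] = true := rfl
theorem allAdj_single (a : Int) : allAdj [a] = true := rfl
theorem allAdj_cons₂ (a b : Int) (t : List Int) :
    allAdj (a :: b :: t) = (decide (a ≤ b) && allAdj (b :: t)) := by
  simp [allAdj]

theorem allAdj_head_le (a : Int) (l : List Int) (h : allAdj (a :: l) = true) :
    ∀ x ∈ a :: l, a ≤ x := by
  induction l generalizing a with
  | nil => intro x hx; simp at hx; omega
  | cons b t ih =>
    rw [allAdj_cons₂] at h
    simp only [Bool.and_eq_true, decide_eq_true_eq] at h
    intro x hx
    rcases List.mem_cons.1 hx with rfl | hx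
    · omega
    · exact le_trans h.1 (ih b h.2 x hx)

theorem allAdj_tail (a : Int) (l : List Int) (h : allAdj (a :: l) = true) : allAdj l = true := by
  cases l with
  | nil => rfl
  | cons b t =>
    rw [allAdj_cons₂] at h
    simp only [Bool.and_eq_true] at h
    exact h.2

-- minimo on a non-empty list is foldl min
theorem minimo_cons (a : Int) (l : List Int) :
    minimo (a :: l) = l.foldl min a := by
  unfold minimo
  rw [PySem.List.pyGetD_zero_cons,
      PySem.List.foldl_pyRange_zero_pyGetD (a :: l) 0
        (fun i v => if v < i then v else i) a]
  have hf : ∀ (i v : Int), (if v < i then v else i) = min i v := by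
    intro i v; rcases lt_or_ge v i with h | h <;> simp [min_def, h]
  simp only [List.foldl_cons, hf, min_self]

theorem foldl_min_le_init (l : List Int) (a : Int) : l.foldl min a ≤ a := by
  induction l generalizing a with
  | nil => simp
  | cons b t ih => exact le_trans (ih (min a b)) (min_le_left a b)

theorem foldl_min_le_mem (l : List Int) (a : Int) : ∀ x ∈ l, l.foldl min a ≤ x := by
  induction l generalizing a with
  | nil => simp
  | cons b t ih =>
    intro x hx
    rcases List.mem_cons.1 hx with rfl | hx
    · exact le_trans (foldl_min_le_init t (min a x)) (min_le_right a x)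
    · exact ih (min a b) x hx

theorem foldl_min_mem (l : List Int) (a : Int) : l.foldl min a ∈ a :: l := by
  induction l generalizing a with
  | nil => simp
  | cons b t ih =>
    rw [List.foldl_cons]
    rcases List.mem_cons.1 (ih (min a b)) with h | h
    · rcases min_choice a b with h' | h' <;> rw [h, h'] <;> simp
    · simp [h]

theorem minimo_mem (a : Int) (l : List Int) : minimo (a :: l) ∈ a :: l := by
  rw [minimo_cons]; exact foldl_min_mem l a

theorem minimo_le (a : Int) (l : List Int) : ∀ x ∈ a :: l, minimo (a :: l) ≤ x := by
  rw [minimo_cons]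
  intro x hx
  rcases List.mem_cons.1 hx with rfl | hx
  · exact foldl_min_le_init l x
  · exact foldl_min_le_mem l a x hx

-- structural form of ordenar's loop
def selSort : Nat → List Int → List Int
  | 0, _ => []
  | k + 1, s => minimo s :: selSort k ((PySem.List.remove? s (minimo s)).getD s)

theorem ordenar_foldl (l : List Int) (res aux : List Int) :
    (l.foldl (fun (st : List Int × List Int) _ =>
        (st.1 ++ [minimo st.2], (PySem.List.remove? st.2 (minimo st.2)).getD st.2))
      (res, aux)).1 = res ++ selSort l.length aux := by
  induction l generalizing res aux with
  | nil => simp [selSort]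
  | cons x t ih => simp [ih, selSort]

theorem ordenar_eq_selSort (s : List Int) : ordenar s = selSort s.length s := by
  unfold ordenar
  rw [ordenar_foldl]
  simp [PySem.List.length_pyRange_one]

theorem remove_minimo (a : Int) (l : List Int) :
    (PySem.List.remove? (a :: l) (minimo (a :: l))).getD (a :: l)
      = (a :: l).erase (minimo (a :: l)) := by
  rw [PySem.List.remove?_eq_some_erase (a :: l) _ (minimo_mem a l)]; rfl

theorem length_erase_minimo (a : Int) (l : List Int) :
    ((a :: l).erase (minimo (a :: l))).length = l.length := by
  rw [List.length_erase_of_mem (minimo_mem a l)]; rfl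

theorem mem_selSort (k : Nat) (s : List Int) (hk : k ≤ s.length) :
    ∀ x ∈ selSort k s, x ∈ s := by
  induction k generalizing s with
  | zero => simp [selSort]
  | succ k ih =>
    cases s with
    | nil => simp at hk
    | cons a l =>
      intro x hx
      rw [selSort, remove_minimo] at hx
      rcases List.mem_cons.1 hx with rfl | hx
      · exact minimo_mem a l
      · have hlen : k ≤ ((a :: l).erase (minimo (a :: l))).length := by
          rw [length_erase_minimo]
          simp only [List.length_cons] at hk
          omega
        exact List.mem_of_mem_erase (ih _ hlen x hx)

theorem sorted_selSort (k : Nat) (s : List Int) (hk : k ≤ s.length) :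
    allAdj (selSort k s) = true := by
  induction k generalizing s with
  | zero => simp [selSort, allAdj_nil]
  | succ k ih =>
    cases s with
    | nil => simp at hk
    | cons a l =>
      rw [selSort, remove_minimo]
      set s' := (a :: l).erase (minimo (a :: l)) with hs'
      have hk' : k ≤ s'.length := by
        rw [hs', length_erase_minimo]
        simp only [List.length_cons] at hk
        omega
      cases hsel : selSort k s' with
      | nil => exact allAdj_single _
      | cons b t =>
        rw [allAdj_cons₂]
        have hb : b ∈ s' := mem_selSort k s' hk' b (by rw [hsel]; simp)
        have hbs : b ∈ a :: l := List.mem_of_mem_erase hb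
        have h1 : minimo (a :: l) ≤ b := minimo_le a l b hbs
        have h2 := ih s' hk'
        rw [hsel] at h2
        simp [h1, h2]

theorem selSort_of_sorted (s : List Int) (h : allAdj s = true) :
    selSort s.length s = s := by
  induction s with
  | nil => rfl
  | cons a l ih =>
    have hmin : minimo (a :: l) = a := by
      have h1 := minimo_le a l a (by simp)
      have h2 := allAdj_head_le a l h _ (minimo_mem a l)
      omega
    rw [List.length_cons, selSort, hmin,
        PySem.List.remove?_cons_self, Option.getD_some, ih (allAdj_tail a l h)]

theorem ordenar_iff_allAdj (c : List Int) :
    (c = ordenar c) ↔ allAdj c = true := by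
  constructor
  · intro h
    rw [h, ordenar_eq_selSort]
    exact sorted_selSort c.length c le_rfl
  · intro h
    rw [ordenar_eq_selSort, selSort_of_sorted c h]

-- columna m ↑k is B's column
theorem fold_range_pick (row : List Int) (k : Nat) (res : List Int) (n : Nat) :
    (List.range n).foldl (fun res j => if j = k then res ++ [row.getD j 0] else res) res
    = res ++ (if k < n then [row.getD k 0] else []) := by
  induction n with
  | zero => simp
  | succ n ih =>
    rw [List.range_succ, List.foldl_append, ih, List.foldl_cons, List.foldl_nil]
    by_cases h : k < n
    · have h1 : n ≠ k := by omega
      have h2 : k < n + 1 := by omega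
      simp [h, h1, h2]
    · by_cases h2 : n = k
      · subst h2
        simp
      · have h3 : ¬ k < n + 1 := by omega
        simp [h, h2, h3]

theorem columna_inner (row : List Int) (k : Nat) (res : List Int) :
    (PySem.List.pyRange 0 (PySem.List.len row) 1).foldl
      (fun res j => if j = (k : Int) then res ++ [PySem.List.pyGetD row j 0] else res) res
    = res ++ (row[k]?).toList := by
  rw [show PySem.List.len row = ((row.length : Int)) from rfl, PySem.List.pyRange_zero_nat,
      List.foldl_map]
  have hfun : (fun (res : List Int) (j : Nat) =>
        if ((j : Int)) = (k : Int) then res ++ [PySem.List.pyGetD row (j : Int) 0] else res)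
      = (fun (res : List Int) (j : Nat) => if j = k then res ++ [row.getD j 0] else res) := by
    funext res j
    simp [Nat.cast_inj]
  rw [hfun, fold_range_pick]
  by_cases hk : k < row.length
  · rw [if_pos hk]
    simp [List.getD_eq_getElem?_getD, List.getElem?_eq_getElem hk]
  · rw [if_neg hk]
    have hnone : row[k]? = none := List.getElem?_eq_none_iff.2 (by omega)
    simp [hnone]

theorem columna_natCast (m : List (List Int)) (k : Nat) :
    columna m (k : Int) = m.filterMap (fun row => row[k]?) := by
  unfold columna
  rw [PySem.List.foldl_pyRange_zero_pyGetD m []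
    (fun res row => (PySem.List.pyRange 0 (PySem.List.len row) 1).foldl
        (fun res j => if j = (k : Int) then res ++ [PySem.List.pyGetD row j 0] else res) res) []]
  have : ∀ (res : List Int), ∀ row ∈ m,
      (PySem.List.pyRange 0 (PySem.List.len row) 1).foldl
        (fun res j => if j = (k : Int) then res ++ [PySem.List.pyGetD row j 0] else res) res
      = res ++ (row[k]?).toList := fun res row _ => columna_inner row k res
  rw [PySem.List.foldl_congr_mem m _ (fun res row => res ++ (row[k]?).toList) [] this,
      PySem.List.foldl_append_eq_flatMap]
  simp [List.filterMap_eq_flatMap_toList]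

-- the inner j-loop of A: appends one True iff the (constant) condition holds and the range is non-empty
theorem inner_noop (c : Prop) [Decidable c] (l : List Int) (st : Bool × List Bool × Int)
    (hn : st.2.2 ≠ 0) :
    l.foldl (fun (st2 : Bool × List Bool × Int) _ =>
        if c ∧ st2.2.2 = 0 then (true, st2.2.1 ++ [true], 1) else st2) st = st := by
  induction l with
  | nil => rfl
  | cons x t ih =>
    rw [List.foldl_cons, if_neg (fun h => hn h.2)]
    exact ih

theorem inner_noop' (c : Prop) [Decidable c] (hc : ¬ c) (l : List Int)
    (st : Bool × List Bool × Int) :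
    l.foldl (fun (st2 : Bool × List Bool × Int) _ =>
        if c ∧ st2.2.2 = 0 then (true, st2.2.1 ++ [true], 1) else st2) st = st := by
  induction l generalizing st with
  | nil => rfl
  | cons x t ih =>
    rw [List.foldl_cons, if_neg (fun h => hc h.1)]
    exact ih st

theorem inner_loop (c : Prop) [Decidable c] (l : List Int) (res : List Bool) :
    (l.foldl (fun (st2 : Bool × List Bool × Int) _ =>
        if c ∧ st2.2.2 = 0 then (true, st2.2.1 ++ [true], 1) else st2)
      (false, res, 0)).2.1
    = if c ∧ l ≠ [] then res ++ [true] else res := by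
  cases l with
  | nil => simp
  | cons x t =>
    by_cases hc : c
    · rw [List.foldl_cons, if_pos ⟨hc, rfl⟩, inner_noop c t _ (by norm_num)]
      rw [if_pos ⟨hc, by simp⟩]
    · rw [inner_noop' c hc, if_neg (fun h => hc h.1)]

theorem outer_loop (m : List (List Int)) (l : List Int) (st : Bool × List Bool × Int) :
    (l.foldl (fun (st : Bool × List Bool × Int) i =>
        (PySem.List.pyRange 0 (PySem.List.len (columna m i)) 1).foldl
          (fun (st2 : Bool × List Bool × Int) _ =>
            if columna m i = ordenar (columna m i) ∧ st2.2.2 = 0 then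
              (true, st2.2.1 ++ [true], 1)
            else st2)
          (false, st.2.1, 0)) st).2.1
    = l.foldl (fun res i =>
        if (columna m i = ordenar (columna m i)) ∧ columna m i ≠ [] then res ++ [true] else res)
      st.2.1 := by
  induction l generalizing st with
  | cons x t ih =>
    rw [List.foldl_cons, ih, List.foldl_cons]
    congr 1
    have h := inner_loop (columna m x = ordenar (columna m x))
      (PySem.List.pyRange 0 (PySem.List.len (columna m x)) 1) st.2.1
    have hne : (PySem.List.pyRange 0 (PySem.List.len (columna m x)) 1) ≠ ([] : List Int)
        ↔ columna m x ≠ [] := by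
      rw [← List.length_pos_iff_ne_nil, ← List.length_pos_iff_ne_nil,
          PySem.List.length_pyRange_one]
      simp only [PySem.List.len, sub_zero]
      omega
    rw [h]
    exact if_congr (and_congr Iff.rfl hne) rfl rfl
  | nil => rfl

-- ===== VERDICT (by name: the statement is the Claim_ definition above) =====
theorem columnas_ordenadas_spec : Claim_equal_columnas_ordenadas := by
  intro m _
  show columnas_ordenadas m = columnas_ordenadas_alt m
  unfold columnas_ordenadas columnas_ordenadas_alt
  rw [outer_loop m _ (false, [], 0)]
  show (PySem.List.pyRange 0 (PySem.List.len m) 1).foldl _ [] = _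
  rw [show PySem.List.len m = ((m.length : Int)) from rfl, PySem.List.pyRange_zero_nat,
      List.foldl_map]
  apply PySem.List.foldl_congr_mem
  intro res k _
  rw [columna_natCast m k]
  set col := m.filterMap (fun row => row[k]?) with hcol
  have hiff : ((col = ordenar col) ∧ col ≠ []) ↔
      (col ≠ [] ∧ (col.zip col.tail).all (fun p => decide (p.1 ≤ p.2)) = true) := by
    rw [ordenar_iff_allAdj]
    unfold allAdj
    tauto
  simp only []
  by_cases h : (col = ordenar col) ∧ col ≠ []
  · rw [if_pos h, if_pos (by simpa using hiff.1 h)]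
  · rw [if_neg h, if_neg (by rw [← hiff] at *; simpa using h)]
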